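-- pv_equiv track=rewrite | github.com/joshuaKnauber/scripting_nodes | node_tree/node_sockets.py | is_valid_python
-- ===== SOURCE A (Python) =====
-- _invalid_chars = [" ","\\","-","?",".",",","<",">","*","+","-","#","'","~","@","€","|","\"","²",
--                     "³","§","$","%","&","/","(","[","]",")","=","}","{","´","´","^","°",":",";"]
--
-- def is_valid_python(value,is_python_name):
--     if value:
--         if not is_python_name:
--             return True
--         else:
--             if value[0].isdigit():
--                 return False
--             for char in _invalid_chars:
--                 if char in value:
--                     return False
--             return True
--     return False
-- ===== SOURCE B (Python) =====
-- _invalid_chars = [" ","\\","-","?",".",",","<",">","*","+","-","#","'","~","@","\u20ac","|","\"","\u00b2",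
--                     "\u00b3","\u00a7","$","%","&","/","(","[","]",")","=","}","{","\u00b4","\u00b4","^","\u00b0",":",";"]
--
-- _invalid_set = frozenset("".join(_invalid_chars))
--
-- def is_valid_python(value, is_python_name):
--     if not value:
--         return False
--     if not is_python_name:
--         return True
--     if value[0].isdigit():
--         return False
--     return not any(c in _invalid_set for c in value)
-- ===== Notes on version B (the rewrite author's own statement) =====
-- stated objective: idiomatic
-- what changed: B inverts the traversal: instead of scanning the input once per forbidden character (38 substring scans), it precomputes a frozenset of forbidden characters and makes a single pass over the input testing set membership.
import Mathlib
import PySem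

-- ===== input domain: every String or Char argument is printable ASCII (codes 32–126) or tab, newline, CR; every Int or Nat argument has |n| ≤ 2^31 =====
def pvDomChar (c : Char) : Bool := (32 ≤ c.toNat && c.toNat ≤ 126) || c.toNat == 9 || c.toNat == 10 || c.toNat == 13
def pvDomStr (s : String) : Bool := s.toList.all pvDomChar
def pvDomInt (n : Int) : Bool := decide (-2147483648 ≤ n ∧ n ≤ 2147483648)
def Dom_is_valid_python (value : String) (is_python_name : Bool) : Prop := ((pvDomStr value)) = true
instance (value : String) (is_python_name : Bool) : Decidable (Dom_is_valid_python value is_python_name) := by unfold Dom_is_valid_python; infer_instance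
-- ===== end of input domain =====

-- B replaces A's loop over the 38 forbidden one-character strings (each a substring scan of the
-- input) by a single pass over the input testing membership in a precomputed set (idiomatic).

-- ===== PORT A =====
def pvInvalidChars : List String :=
  [" ", "\\", "-", "?", ".", ",", "<", ">", "*", "+", "-", "#", "'", "~", "@", "€", "|", "\"", "²",
   "³", "§", "$", "%", "&", "/", "(", "[", "]", ")", "=", "}", "{", "´", "´", "^", "°", ":", ";"]

-- the 'for char in _invalid_chars: if char in value: return False' loop
def pvCheckLoop : List String → String → Bool
  | [], _ => true
  | ch :: rest, value => if PySem.Str.isIn ch value then false else pvCheckLoop rest value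

def is_valid_python (value : String) (is_python_name : Bool) : Bool :=
  match value.toList with
  | [] => false               -- 'if value:' fails → return False
  | c :: _ =>
    if !is_python_name then true
    else if PySem.Chars.isdigit c then false
    else pvCheckLoop pvInvalidChars value

-- ===== PORT B =====
def pvInvalidSet : PySem.Set Char :=
  PySem.Set.ofList [' ', '\\', '-', '?', '.', ',', '<', '>', '*', '+', '-', '#', '\'', '~', '@',
    '€', '|', '"', '²', '³', '§', '$', '%', '&', '/', '(', '[', ']', ')', '=', '}', '{', '´',
    '´', '^', '°', ':', ';']

def is_valid_python_alt (value : String) (is_python_name : Bool) : Bool :=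
  match value.toList with
  | [] => false               -- 'if not value: return False'
  | c :: _ =>
    if !is_python_name then true
    else if PySem.Chars.isdigit c then false
    else !(value.toList.any (fun ch => PySem.Set.contains pvInvalidSet ch))

-- ===== PRECONDITION & SPEC =====
def Spec_is_valid_python (value : String) (is_python_name : Bool) (out : Bool) : Prop := out = is_valid_python_alt value is_python_name
instance (value : String) (is_python_name : Bool) (out : Bool) : Decidable (Spec_is_valid_python value is_python_name out) := by unfold Spec_is_valid_python; infer_instance

-- ===== CLAIM (what is proved, stated in full; the proofs are below) =====
def Claim_equal_is_valid_python : Prop := ∀ (value : String) (is_python_name : Bool), Dom_is_valid_python value is_python_name → Spec_is_valid_python value is_python_name (is_valid_python value is_python_name)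

-- ===== LEMMAS AND PROOFS =====

-- the chars whose singleton strings make up pvInvalidChars
def pvInvalidCharList : List Char :=
  [' ', '\\', '-', '?', '.', ',', '<', '>', '*', '+', '-', '#', '\'', '~', '@', '€', '|', '"',
   '²', '³', '§', '$', '%', '&', '/', '(', '[', ']', ')', '=', '}', '{', '´', '´', '^', '°', ':', ';']

lemma pvInvalidChars_eq_map :
    pvInvalidChars = pvInvalidCharList.map (fun c => String.ofList [c]) := by decide

lemma singleton_infix_iff_mem {c : Char} {l : List Char} : [c] <:+: l ↔ c ∈ l := by
  constructor
  · intro h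
    exact List.singleton_sublist.mp h.sublist
  · intro h
    obtain ⟨s, t, rfl⟩ := List.append_of_mem h
    exact ⟨s, t, by simp⟩

lemma pvCheckLoop_eq_not_any (chs : List String) (value : String) :
    pvCheckLoop chs value = !(chs.any (fun ch => PySem.Str.isIn ch value)) := by
  induction chs with
  | nil => rfl
  | cons ch rest ih =>
    rw [pvCheckLoop, List.any_cons, ih]
    cases h : PySem.Str.isIn ch value <;> simp

lemma pvLoop_eq_scan (value : String) :
    pvCheckLoop pvInvalidChars value
      = !(value.toList.any (fun ch => PySem.Set.contains pvInvalidSet ch)) := by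
  rw [pvCheckLoop_eq_not_any]
  congr 1
  rw [pvInvalidChars_eq_map, List.any_map]
  rw [Bool.eq_iff_iff]
  simp only [List.any_eq_true, Function.comp_apply, PySem.Str.isIn_iff_infix,
    PySem.Set.contains_iff]
  constructor
  · rintro ⟨c, hc, h⟩
    have hm : c ∈ value.toList := by
      have ht : (String.ofList [c]).toList = [c] := by simp
      rw [ht] at h
      exact singleton_infix_iff_mem.mp h
    have hmem : c ∈ pvInvalidSet := (PySem.Set.mem_ofList pvInvalidCharList c).mpr hc
    exact ⟨c, hm, hmem⟩
  · rintro ⟨c, hc, h⟩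
    have hm : c ∈ pvInvalidCharList :=
      (PySem.Set.mem_ofList pvInvalidCharList c).mp (h)
    refine ⟨c, hm, ?_⟩
    have ht : (String.ofList [c]).toList = [c] := by simp
    rw [ht]
    exact singleton_infix_iff_mem.mpr hc

-- ===== VERDICT (by name: the statement is the Claim_ definition above) =====
theorem is_valid_python_spec : Claim_equal_is_valid_python := by
  intro value ipn _
  unfold Spec_is_valid_python is_valid_python is_valid_python_alt
  rw [pvLoop_eq_scan]
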